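-- pv_equiv track=rewrite | github.com/Super-Vieh/Krips | Datenbank/datenbank.py | saubere_spielzug
-- ===== SOURCE A (Python) =====
-- def saubere_spielzug(zug:str):
--     ergebniss=""
--     last_buchtabe=""
--     for buchstabe in zug:
--         if( buchstabe== "," and last_buchtabe!=",")or(buchstabe!=","):
--             ergebniss+=buchstabe
--         last_buchtabe=buchstabe
--     return ergebniss
-- ===== SOURCE B (Python) =====
-- def saubere_spielzug(zug: str):
--     # Traverse maximal runs of equal characters; a comma run contributes a
--     # single comma, any other run is copied verbatim.
--     pieces = []
--     i = 0
--     n = len(zug)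
--     while i < n:
--         j = i
--         while j < n and zug[j] == zug[i]:
--             j += 1
--         pieces.append("," if zug[i] == "," else zug[i:j])
--         i = j
--     return "".join(pieces)
-- ===== Notes on version B (the rewrite author's own statement) =====
-- stated objective: alternative
-- what changed: B scans the string as maximal runs of equal characters (groupby-style), emitting one comma per comma run and copying other runs as slices, instead of A's per-character loop that tracks the previous character.
import Mathlib
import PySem

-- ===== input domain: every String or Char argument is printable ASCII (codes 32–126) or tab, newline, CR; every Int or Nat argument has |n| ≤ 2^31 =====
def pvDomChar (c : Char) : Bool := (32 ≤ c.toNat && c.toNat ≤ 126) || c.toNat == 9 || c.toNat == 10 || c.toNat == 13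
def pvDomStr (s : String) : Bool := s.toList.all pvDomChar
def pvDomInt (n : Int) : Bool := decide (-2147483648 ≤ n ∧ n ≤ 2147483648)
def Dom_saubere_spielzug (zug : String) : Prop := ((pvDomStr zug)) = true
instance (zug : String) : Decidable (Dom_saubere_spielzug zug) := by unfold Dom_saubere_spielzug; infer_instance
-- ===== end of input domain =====

-- B collapses comma runs by scanning maximal runs of equal characters instead of A's
-- per-character previous-character loop ('alternative' objective; same return value).

-- ===== PORT A =====
-- ergebniss and last_buchtabe are Python strings; modelled as List Char, wrapped
-- back with String.ofList at the end.
def saubere_spielzug (zug : String) : String :=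
  let r := zug.toList.foldl
    (fun (st : List Char × List Char) (buchstabe : Char) =>
      ( if (buchstabe = ',' ∧ st.2 ≠ [',']) ∨ buchstabe ≠ ','
          then st.1 ++ [buchstabe] else st.1
      , [buchstabe]))
    ([], [])
  String.ofList r.1

-- ===== PORT B =====
-- one step per maximal run of equal characters, as in Source B's outer while loop
def altGo : List Char → List Char
  | [] => []
  | c :: rest =>
      (if c = ',' then [','] else c :: rest.takeWhile (· = c))
        ++ altGo (rest.dropWhile (· = c))
termination_by l => l.length
decreasing_by
  simpa using Nat.lt_succ_of_le (List.length_dropWhile_le _ _)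

def saubere_spielzug_alt (zug : String) : String :=
  String.ofList (altGo zug.toList)

-- ===== PRECONDITION & SPEC =====
def Spec_saubere_spielzug (zug : String) (out : String) : Prop := out = saubere_spielzug_alt zug
instance (zug : String) (out : String) : Decidable (Spec_saubere_spielzug zug out) := by unfold Spec_saubere_spielzug; infer_instance

-- ===== CLAIM (what is proved, stated in full; the proofs are below) =====
def Claim_equal_saubere_spielzug : Prop := ∀ (zug : String), Dom_saubere_spielzug zug → Spec_saubere_spielzug zug (saubere_spielzug zug)

-- ===== LEMMAS AND PROOFS =====

-- canonical form: collapse with a 'previous char was a comma' flag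
def collapse (p : Bool) : List Char → List Char
  | [] => []
  | b :: t =>
      if b = ',' then (if p then [] else [',']) ++ collapse true t
      else b :: collapse false t

theorem foldl_A (l : List Char) (acc last : List Char) :
    (l.foldl
      (fun (st : List Char × List Char) (buchstabe : Char) =>
        ( if (buchstabe = ',' ∧ st.2 ≠ [',']) ∨ buchstabe ≠ ','
            then st.1 ++ [buchstabe] else st.1
        , [buchstabe]))
      (acc, last)).1 = acc ++ collapse (last = [',']) l := by
  induction l generalizing acc last with
  | nil => simp [collapse]
  | cons b t ih =>
      by_cases hb : b = ','
      · subst hb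
        by_cases hl : last = [',']
        · simp [hl, collapse, ih]
        · simp [hl, collapse, ih]
      · simp [collapse, hb, ih]

theorem collapse_true_dropWhile (l : List Char) :
    collapse true l = collapse false (l.dropWhile (· = ',')) := by
  induction l with
  | nil => simp [collapse]
  | cons b t ih =>
      by_cases hb : b = ','
      · subst hb; simpa [collapse, List.dropWhile] using ih
      · simp [collapse, hb, List.dropWhile]

theorem collapse_false_run (c : Char) (hc : ¬ c = ',') (l : List Char) :
    collapse false l = l.takeWhile (· = c) ++ collapse false (l.dropWhile (· = c)) := by
  induction l with
  | nil => simp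
  | cons d t ih =>
      by_cases hd : d = c
      · subst hd
        simp [collapse, hc, List.takeWhile, List.dropWhile, ih]
      · simp [List.takeWhile, List.dropWhile, hd]

theorem altGo_eq_collapse (l : List Char) : altGo l = collapse false l := by
  induction l using altGo.induct with
  | case1 => simp [altGo, collapse]
  | case2 c rest ih =>
      by_cases hc : c = ','
      · subst hc
        simp [altGo, collapse, ih, ← collapse_true_dropWhile]
      · simp only [altGo, collapse, if_neg hc]
        rw [collapse_false_run c hc rest, ih]
        simp

-- ===== VERDICT (by name: the statement is the Claim_ definition above) =====
theorem saubere_spielzug_spec : Claim_equal_saubere_spielzug := by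
  intro zug _
  unfold Spec_saubere_spielzug saubere_spielzug saubere_spielzug_alt
  rw [altGo_eq_collapse]
  have := foldl_A zug.toList [] []
  simp at this
  simp [this]
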